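-- pv_equiv track=rewrite | github.com/dayeonkimm/CodingTest_Practice | 프로그래머스/0/181834. l로 만들기/l로 만들기.py | solution
-- ===== SOURCE A (Python) =====
-- def solution(myString):
--     answer = ''
--     for str in myString:
--         if str in ["a","b","c","d","e","f","g","h","i","j","k"]:
--             answer += "l"
--         else:
--             answer += str
--     return answer
-- ===== SOURCE B (Python) =====
-- def solution(myString):
--     for ch in "abcdefghijk":
--         myString = myString.replace(ch, "l")
--     return myString
-- ===== Notes on version B (the rewrite author's own statement) =====
-- stated objective: alternative
-- what changed: B makes eleven staged whole-string passes, one str.replace per letter a-k, instead of A's single per-character scan with a membership test and string concatenation.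
import Mathlib
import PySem

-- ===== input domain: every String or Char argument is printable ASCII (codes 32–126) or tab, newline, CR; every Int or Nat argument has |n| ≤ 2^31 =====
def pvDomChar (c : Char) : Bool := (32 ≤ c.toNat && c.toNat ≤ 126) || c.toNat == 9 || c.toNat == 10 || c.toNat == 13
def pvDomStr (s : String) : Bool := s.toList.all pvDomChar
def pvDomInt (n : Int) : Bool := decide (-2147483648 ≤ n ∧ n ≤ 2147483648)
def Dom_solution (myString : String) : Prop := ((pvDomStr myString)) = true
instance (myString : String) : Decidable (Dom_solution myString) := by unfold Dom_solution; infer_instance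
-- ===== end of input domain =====

-- B replaces A's single per-character scan with eleven staged whole-string str.replace passes, one per letter a–k (alternative decomposition; return value only).

-- ===== PORT A =====
def solution (myString : String) : String :=
  String.ofList (myString.toList.foldl
    (fun answer c =>
      if c ∈ ['a','b','c','d','e','f','g','h','i','j','k']
      then answer ++ ['l'] else answer ++ [c]) [])

-- ===== PORT B =====
-- for ch in "abcdefghijk": myString = myString.replace(ch, "l")  (the string literal iterated as its character list)
def solution_alt (myString : String) : String :=
  (['a','b','c','d','e','f','g','h','i','j','k']).foldl
    (fun s ch => PySem.Str.replace s (String.ofList [ch]) "l") myString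

-- ===== PRECONDITION & SPEC =====
def Spec_solution (myString : String) (out : String) : Prop := out = solution_alt myString
instance (myString : String) (out : String) : Decidable (Spec_solution myString out) := by unfold Spec_solution; infer_instance

-- ===== CLAIM (what is proved, stated in full; the proofs are below) =====
def Claim_equal_solution : Prop := ∀ (myString : String), Dom_solution myString → Spec_solution myString (solution myString)

-- ===== LEMMAS AND PROOFS =====

-- single-char str.replace is a per-character map
lemma replace_go_single (o n : Char) :
    ∀ (fuel : Nat) (l acc : List Char), l.length ≤ fuel →
      PySem.Chars.replace.go [o] [n] fuel l acc
        = acc.reverse ++ l.map (fun c => if c = o then n else c) := by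
  intro fuel
  induction fuel with
  | zero =>
    intro l acc h
    have : l = [] := List.eq_nil_of_length_eq_zero (Nat.le_zero.mp h)
    subst this
    simp [PySem.Chars.replace.go]
  | succ f ih =>
    intro l acc h
    cases l with
    | nil => simp [PySem.Chars.replace.go]
    | cons c t =>
      rw [PySem.Chars.replace.go]
      by_cases hc : c = o
      · subst hc
        have hp : List.isPrefixOf [c] (c :: t) = true := by
          simp [List.isPrefixOf]
        rw [if_pos hp]
        rw [show List.drop ([c].length) (c :: t) = t from rfl,
            show [n].reverse ++ acc = n :: acc from rfl,
            ih t (n :: acc) (by simpa using Nat.succ_le_succ_iff.mp h)]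
        simp
      · have hp : List.isPrefixOf [o] (c :: t) = false := by
          simp [List.isPrefixOf]; exact fun e => absurd e.symm hc
        rw [if_neg (by simp [hp])]
        rw [ih t (c :: acc) (by simpa using Nat.succ_le_succ_iff.mp h)]
        simp [hc]

lemma replace_single (s : List Char) (o n : Char) :
    PySem.Chars.replace s [o] [n] = s.map (fun c => if c = o then n else c) := by
  rw [PySem.Chars.replace]
  simp only [List.isEmpty_cons]
  simpa using replace_go_single o n s.length s [] (le_refl _)

-- the composed per-character effect of the eleven passes equals A's membership branch
lemma comp_char (c : Char) :
    (List.foldl (fun x ch => if x = ch then 'l' else x) c ['a','b','c','d','e','f','g','h','i','j','k'])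
      = (if c ∈ ['a','b','c','d','e','f','g','h','i','j','k'] then 'l' else c) := by
  by_cases hmem : c ∈ ['a','b','c','d','e','f','g','h','i','j','k']
  · rw [if_pos hmem]
    simp only [List.mem_cons, List.not_mem_nil, or_false] at hmem
    rcases hmem with h|h|h|h|h|h|h|h|h|h|h <;> subst h <;> decide
  · rw [if_neg hmem]
    simp only [List.mem_cons, List.not_mem_nil, or_false, not_or] at hmem
    obtain ⟨h1,h2,h3,h4,h5,h6,h7,h8,h9,h10,h11⟩ := hmem
    show List.foldl _ c ('a'::'b'::'c'::'d'::'e'::'f'::'g'::'h'::'i'::'j'::'k'::[]) = c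
    simp [List.foldl, h1,h2,h3,h4,h5,h6,h7,h8,h9,h10,h11]

-- B's foldl of replaces, read on toList, is the foldl of the per-character maps
lemma alt_toList (s : String) :
    (solution_alt s).toList
      = (['a','b','c','d','e','f','g','h','i','j','k']).foldl
          (fun (l : List Char) ch => l.map (fun c => if c = ch then 'l' else c)) s.toList := by
  unfold solution_alt
  have key : ∀ (letters : List Char) (t : String),
      (letters.foldl (fun s ch => PySem.Str.replace s (String.ofList [ch]) "l") t).toList
        = letters.foldl (fun (l : List Char) ch => l.map (fun c => if c = ch then 'l' else c)) t.toList := by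
    intro letters
    induction letters with
    | nil => intro t; rfl
    | cons ch rest ih =>
      intro t
      simp only [List.foldl_cons]
      rw [ih]
      congr 1
      rw [PySem.Str.toList_replace]
      rw [String.toList_ofList, show ("l" : String).toList = ['l'] from by decide, replace_single]
  exact key _ s

-- A's fold, on toList: a per-character map of the membership branch
lemma a_toList (s : String) : (solution s).toList
    = s.toList.map (fun c => if c ∈ ['a','b','c','d','e','f','g','h','i','j','k'] then 'l' else c) := by
  unfold solution
  rw [String.toList_ofList]
  have step : ∀ (a : List Char) (c : Char),
      (if c ∈ ['a','b','c','d','e','f','g','h','i','j','k'] then a ++ ['l'] else a ++ [c])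
      = a ++ [if c ∈ ['a','b','c','d','e','f','g','h','i','j','k'] then 'l' else c] := by
    intro a c; split_ifs <;> rfl
  rw [PySem.List.foldl_congr_mem _ _ _ _ (fun a c _ => step a c),
      PySem.List.foldl_append_singleton_eq_map]
  simp

-- B's eleven passes, on toList: the same per-character map
lemma b_toList (s : String) : (solution_alt s).toList
    = s.toList.map (fun c => if c ∈ ['a','b','c','d','e','f','g','h','i','j','k'] then 'l' else c) := by
  rw [alt_toList]
  have fold_map : ∀ (letters : List Char) (l : List Char),
      letters.foldl (fun (l : List Char) ch => l.map (fun c => if c = ch then 'l' else c)) l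
        = l.map (fun c => letters.foldl (fun x ch => if x = ch then 'l' else x) c) := by
    intro letters
    induction letters with
    | nil => intro l; simp
    | cons ch rest ih =>
      intro l
      simp only [List.foldl_cons]
      rw [ih, List.map_map]
      rfl
  rw [fold_map]
  exact List.map_congr_left (fun c _ => comp_char c)

-- ===== VERDICT (by name: the statement is the Claim_ definition above) =====
theorem solution_spec : Claim_equal_solution := by
  intro s _
  unfold Spec_solution
  have h : (solution s).toList = (solution_alt s).toList := (a_toList s).trans (b_toList s).symm
  have h1 : String.ofList (solution s).toList = solution s := String.ofList_toList
  have h2 : String.ofList (solution_alt s).toList = solution_alt s := String.ofList_toList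
  rw [← h1, ← h2, h]
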